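-- pv_equiv track=rewrite | github.com/nikbhor/Python | Program15.py | CountEvenDigit
-- ===== SOURCE A (Python) =====
-- def CountEvenDigit(iNo):
--     if iNo == 0:
--        return 1
--     if iNo < 0:
--        iNo = - iNo
--
--     iCnt = 0
--     while iNo != 0:
--
--          iDigit = iNo % 10
--          if ((iDigit % 2) == 0):
--             iCnt += 1
--          iNo //= 10
--     return iCnt
-- ===== SOURCE B (Python) =====
-- def CountEvenDigit(iNo):
--     return sum(1 for c in str(abs(iNo)) if int(c) % 2 == 0)
-- ===== Notes on version B (the rewrite author's own statement) =====
-- stated objective: idiomatic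
-- what changed: Replaces the arithmetic while-loop (repeated %10 and //=10) and the explicit zero special case with a single sum over the characters of str(abs(iNo)); the zero case falls out naturally because its string holds one even digit character.
import Mathlib
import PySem

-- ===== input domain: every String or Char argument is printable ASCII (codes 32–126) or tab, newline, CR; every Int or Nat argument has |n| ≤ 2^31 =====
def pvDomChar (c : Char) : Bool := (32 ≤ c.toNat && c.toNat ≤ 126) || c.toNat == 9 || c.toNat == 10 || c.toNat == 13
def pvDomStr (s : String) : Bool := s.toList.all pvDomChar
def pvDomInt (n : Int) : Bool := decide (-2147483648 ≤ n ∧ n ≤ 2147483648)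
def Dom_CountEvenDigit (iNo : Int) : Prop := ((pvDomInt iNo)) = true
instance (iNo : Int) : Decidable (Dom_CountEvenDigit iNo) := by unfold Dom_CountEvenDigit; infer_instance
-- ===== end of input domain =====

-- B replaces A's arithmetic digit-extraction while-loop (and the iNo == 0 special case) by the
-- idiomatic one-liner counting even characters of str(abs(iNo)); same cost, no speed claim.

-- ===== PORT A =====
-- A's while-loop runs after `if iNo < 0: iNo = -iNo`, so it always starts from |iNo| ≥ 0;
-- on nonnegative ints Python's % 10 and //= 10 coincide with Nat.mod / Nat.div, so the loop is
-- the following structural recursion on the natural number |iNo|, with the same accumulator.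
def pvALoop (iNo : Nat) (iCnt : Int) : Int :=
  if _h : iNo = 0 then iCnt
  else pvALoop (iNo / 10) (if (iNo % 10) % 2 = 0 then iCnt + 1 else iCnt)
  decreasing_by exact Nat.div_lt_self (Nat.pos_of_ne_zero _h) (by norm_num)

def CountEvenDigit (iNo : Int) : Int :=
  if iNo = 0 then 1
  else pvALoop iNo.natAbs 0

-- ===== PORT B =====
-- str(abs(iNo)) = PySem.Int.toStr |iNo|; on the digit characters str() produces, Python's
-- int(c) % 2 == 0 is exactly (c.toNat - '0'.toNat) % 2 == 0.
def CountEvenDigit_alt (iNo : Int) : Int :=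
  ((PySem.Int.toStr (iNo.natAbs : Int)).toList.countP
      (fun c => (c.toNat - '0'.toNat) % 2 == 0) : Int)

-- ===== PRECONDITION & SPEC =====
def Spec_CountEvenDigit (iNo : Int) (out : Int) : Prop := out = CountEvenDigit_alt iNo
instance (iNo : Int) (out : Int) : Decidable (Spec_CountEvenDigit iNo out) := by unfold Spec_CountEvenDigit; infer_instance

-- ===== CLAIM (what is proved, stated in full; the proofs are below) =====
def Claim_equal_CountEvenDigit : Prop := ∀ (iNo : Int), Dom_CountEvenDigit iNo → Spec_CountEvenDigit iNo (CountEvenDigit iNo)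

-- ===== LEMMAS AND PROOFS =====

-- the character predicate of B's port
def pvEvenCh (c : Char) : Bool := (c.toNat - '0'.toNat) % 2 == 0

lemma pvEvenCh_digitChar {d : Nat} (hd : d < 10) :
    pvEvenCh (Nat.digitChar d) = decide (d % 2 = 0) := by
  interval_cases d <;> decide

-- toDigitsCore with a nonempty accumulator = the accumulator appended to the [] run
lemma pvToDigitsCore_append (f : Nat) : ∀ (n : Nat) (l : List Char),
    Nat.toDigitsCore 10 f n l = Nat.toDigitsCore 10 f n [] ++ l := by
  induction f with
  | zero => intro n l; simp [Nat.toDigitsCore]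
  | succ f ih =>
    intro n l
    simp only [Nat.toDigitsCore]
    by_cases h : n / 10 = 0
    · simp [h]
    · simp only [h, if_false]
      rw [ih (n / 10) (Nat.digitChar (n % 10) :: l), ih (n / 10) [Nat.digitChar (n % 10)]]
      simp

-- A's loop equals the even-digit-character count of the toDigitsCore run, plus the accumulator
lemma pvALoop_eq_count (f : Nat) : ∀ (n : Nat) (cnt : Int), n ≠ 0 → n ≤ f →
    pvALoop n cnt = cnt + ((Nat.toDigitsCore 10 f n []).countP pvEvenCh : Int) := by
  induction f with
  | zero => intro n cnt hn hf; omega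
  | succ f ih =>
    intro n cnt hn hf
    rw [pvALoop]
    simp only [hn, dite_false, Nat.toDigitsCore]
    have hd : n % 10 < 10 := Nat.mod_lt _ (by norm_num)
    by_cases h : n / 10 = 0
    · rw [h, pvALoop]
      simp [pvEvenCh_digitChar hd]
      split_ifs <;> simp_all
    · simp only [h, if_false]
      rw [pvToDigitsCore_append, List.countP_append,
        ih (n / 10) _ h (by omega)]
      simp [pvEvenCh_digitChar hd]
      split_ifs <;> simp_all
      omega

lemma pvAlt_eq (iNo : Int) :
    CountEvenDigit_alt iNo = ((Nat.toDigits 10 iNo.natAbs).countP pvEvenCh : Int) := by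
  unfold CountEvenDigit_alt
  rw [PySem.Int.toList_toStr]
  have : PySem.Int.toChars (iNo.natAbs : Int) = Nat.toDigits 10 iNo.natAbs := by
    unfold PySem.Int.toChars
    rw [if_neg (by simp), Int.toNat_natCast]
  rw [this]
  rfl

-- ===== VERDICT (by name: the statement is the Claim_ definition above) =====
theorem CountEvenDigit_spec : Claim_equal_CountEvenDigit := by
  intro iNo _hDom
  unfold Spec_CountEvenDigit CountEvenDigit
  rw [pvAlt_eq]
  by_cases h0 : iNo = 0
  · subst h0; decide
  · have hn : iNo.natAbs ≠ 0 := by simpa using h0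
    simp only [h0, if_false]
    rw [pvALoop_eq_count (iNo.natAbs + 1) iNo.natAbs 0 hn (by omega)]
    simp [Nat.toDigits]
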